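-- pv_equiv track=rewrite | github.com/SereMark/Hybrid-Chess-AI | python/fen_tools.py | _swap_castling_rights
-- ===== SOURCE A (Python) =====
-- _CASTLING_ORDER = "KQkq"
--
-- def _swap_castling_rights(rights: str) -> str:
--     if not rights or rights == "-":
--         return "-"
--     swapped: list[str] = []
--     for ch in rights:
--         if ch in _CASTLING_ORDER:
--             swapped.append(ch.lower() if ch.isupper() else ch.upper())
--     swapped = list(dict.fromkeys(swapped))
--     ordered = [c for c in _CASTLING_ORDER if c in swapped]
--     return "".join(ordered) if ordered else "-"
-- ===== SOURCE B (Python) =====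
-- _RESULTS = (
--     "-", "q", "k", "kq", "Q", "Qq", "Qk", "Qkq",
--     "K", "Kq", "Kk", "Kkq", "KQ", "KQq", "KQk", "KQkq",
-- )
--
-- def _swap_castling_rights(rights: str) -> str:
--     if not rights or rights == "-":
--         return "-"
--     mask = 0
--     for ch in rights:
--         if ch == "k":
--             mask |= 8
--         elif ch == "q":
--             mask |= 4
--         elif ch == "K":
--             mask |= 2
--         elif ch == "Q":
--             mask |= 1
--     return _RESULTS[mask]
-- ===== Notes on version B (the rewrite author's own statement) =====
-- stated objective: alternative
-- what changed: B replaces A's swap-then-dedup-then-reorder list passes by a single pass that ORs each relevant input character into a 4-bit mask and returns the corresponding entry of a precomputed 16-string result table, with no intermediate lists, dedup or join.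
import Mathlib
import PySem

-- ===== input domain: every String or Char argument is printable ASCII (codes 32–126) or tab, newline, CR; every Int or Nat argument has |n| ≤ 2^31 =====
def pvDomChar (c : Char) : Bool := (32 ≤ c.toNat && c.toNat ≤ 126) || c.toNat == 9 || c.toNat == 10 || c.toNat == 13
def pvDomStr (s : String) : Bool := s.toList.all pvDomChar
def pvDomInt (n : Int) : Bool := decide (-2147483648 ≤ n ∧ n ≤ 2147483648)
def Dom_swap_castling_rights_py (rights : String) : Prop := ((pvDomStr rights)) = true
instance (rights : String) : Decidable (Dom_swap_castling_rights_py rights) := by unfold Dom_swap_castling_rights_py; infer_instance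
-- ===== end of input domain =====

-- B replaces A's swap/dedup/reorder list passes by a single pass that ORs the four relevant
-- characters into a 4-bit mask and returns a precomputed 16-entry result table entry (objective: alternative).

-- ===== PORT A =====
-- ch.lower()/ch.upper()/ch.isupper(): only reached for ch ∈ "KQkq", where Char.toLower/
-- Char.toUpper/Char.isUpper agree exactly with Python on these ASCII letters.
def pvSwapCase (c : Char) : Char := if c.isUpper then c.toLower else c.toUpper

def swap_castling_rights_py (rights : String) : String :=
  if rights = "" || rights = "-" then "-"
  else
    let swapped := rights.toList.foldl
      (fun acc ch => if ("KQkq".toList).contains ch then acc ++ [pvSwapCase ch] else acc) []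
    -- list(dict.fromkeys(swapped)) = first occurrences in order
    let swapped' := PySem.List.dedup swapped
    let ordered := ("KQkq".toList).filter (fun c => swapped'.contains c)
    if ordered = [] then "-" else String.ofList ordered

-- ===== PORT B =====
-- _RESULTS, a tuple of 16 strings indexed by the bitmask
def pvResults : List String :=
  ["-", "q", "k", "kq", "Q", "Qq", "Qk", "Qkq",
   "K", "Kq", "Kk", "Kkq", "KQ", "KQq", "KQk", "KQkq"]

-- the if/elif chain of the loop body: the bit ORed into mask for a character (0 for others)
def pvBit (ch : Char) : Nat :=
  if ch = 'k' then 8 else if ch = 'q' then 4 else if ch = 'K' then 2 else if ch = 'Q' then 1 else 0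

def swap_castling_rights_py_alt (rights : String) : String :=
  if rights = "" || rights = "-" then "-"
  else
    let mask := rights.toList.foldl (fun m ch => m ||| pvBit ch) 0
    -- mask < 16 by construction (each ORed bit < 16), so Python's _RESULTS[mask]
    -- never raises; getD's default "-" is unreachable.
    pvResults.getD mask "-"

-- ===== PRECONDITION & SPEC =====
def Spec_swap_castling_rights_py (rights : String) (out : String) : Prop := out = swap_castling_rights_py_alt rights
instance (rights : String) (out : String) : Decidable (Spec_swap_castling_rights_py rights out) := by unfold Spec_swap_castling_rights_py; infer_instance

-- ===== CLAIM (what is proved, stated in full; the proofs are below) =====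
def Claim_equal_swap_castling_rights_py : Prop := ∀ (rights : String), Dom_swap_castling_rights_py rights → Spec_swap_castling_rights_py rights (swap_castling_rights_py rights)

-- ===== LEMMAS AND PROOFS =====

-- A's accumulation loop equals a filter-then-map.
theorem pvSwapped_eq (l acc : List Char) :
    l.foldl (fun acc ch => if ("KQkq".toList).contains ch then acc ++ [pvSwapCase ch] else acc) acc
      = acc ++ (l.filter (fun ch => ("KQkq".toList).contains ch)).map pvSwapCase := by
  induction l generalizing acc with
  | nil => simp
  | cons x xs ih =>
    rw [List.foldl_cons, List.filter_cons, ih]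
    split_ifs <;> simp

-- For a canonical character c, membership of its case-swap in the input decides
-- membership of c in A's swapped list.
def pvSwapMap (c : Char) : Char :=
  if c = 'K' then 'k' else if c = 'Q' then 'q' else if c = 'k' then 'K' else 'Q'

theorem pvMem_swapped (l : List Char) (c : Char) (hc : c ∈ ("KQkq".toList)) :
    (c ∈ (l.filter (fun ch => ("KQkq".toList).contains ch)).map pvSwapCase) ↔ pvSwapMap c ∈ l := by
  simp only [List.mem_map, List.mem_filter]
  constructor
  · rintro ⟨ch, ⟨hch, hmem⟩, rfl⟩
    have hl : "KQkq".toList = ['K', 'Q', 'k', 'q'] := rfl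
    rw [hl] at hmem
    have : ch = 'K' ∨ ch = 'Q' ∨ ch = 'k' ∨ ch = 'q' := by simpa using hmem
    rcases this with rfl | rfl | rfl | rfl <;> simpa [pvSwapCase, pvSwapMap] using hch
  · intro h
    refine ⟨pvSwapMap c, ⟨h, ?_⟩, ?_⟩ <;>
    · have hl : "KQkq".toList = ['K', 'Q', 'k', 'q'] := rfl
      rw [hl] at hc
      have : c = 'K' ∨ c = 'Q' ∨ c = 'k' ∨ c = 'q' := by simpa using hc
      rcases this with rfl | rfl | rfl | rfl <;> decide

-- B's fold factors over its start value.
theorem pvFold_lor (l : List Char) (m : Nat) :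
    l.foldl (fun m ch => m ||| pvBit ch) m
      = m ||| l.foldl (fun m ch => m ||| pvBit ch) 0 := by
  induction l generalizing m with
  | nil => simp
  | cons x xs ih =>
    rw [List.foldl_cons, List.foldl_cons, ih (m ||| pvBit x), ih (Nat.zero ||| pvBit x)]
    simp [Nat.lor_assoc]

-- The mask is determined by membership of the four characters.
theorem pvMask_eq (l : List Char) :
    l.foldl (fun m ch => m ||| pvBit ch) 0
      = (if 'k' ∈ l then 8 else 0) ||| (if 'q' ∈ l then 4 else 0)
        ||| (if 'K' ∈ l then 2 else 0) ||| (if 'Q' ∈ l then 1 else 0) := by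
  induction l with
  | nil => simp
  | cons x xs ih =>
    rw [List.foldl_cons, pvFold_lor, ih]
    simp only [List.mem_cons]
    simp only [show ('k' : Char) = x ↔ x = 'k' from eq_comm,
      show ('q' : Char) = x ↔ x = 'q' from eq_comm,
      show ('K' : Char) = x ↔ x = 'K' from eq_comm,
      show ('Q' : Char) = x ↔ x = 'Q' from eq_comm]
    by_cases h8 : 'k' ∈ xs <;> by_cases h4 : 'q' ∈ xs <;>
      by_cases h2 : 'K' ∈ xs <;> by_cases h1 : 'Q' ∈ xs <;>
      by_cases e8 : x = 'k' <;> by_cases e4 : x = 'q' <;>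
      by_cases e2 : x = 'K' <;> by_cases e1 : x = 'Q' <;>
      simp_all [pvBit]

-- ===== VERDICT (by name: the statement is the Claim_ definition above) =====
theorem swap_castling_rights_py_spec : Claim_equal_swap_castling_rights_py := by
  intro rights _
  unfold Spec_swap_castling_rights_py swap_castling_rights_py swap_castling_rights_py_alt
  by_cases h : (rights = "" || rights = "-") = true
  · simp [h]
  · simp only [h, Bool.false_eq_true, if_false]
    rw [pvMask_eq]
    have hfil :
        ("KQkq".toList).filter
            (fun c => (PySem.List.dedup
              (rights.toList.foldl
                (fun acc ch => if ("KQkq".toList).contains ch then acc ++ [pvSwapCase ch] else acc)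
                [])).contains c)
          = ("KQkq".toList).filter (fun c => decide (pvSwapMap c ∈ rights.toList)) := by
      apply List.filter_congr
      intro c hc
      rw [pvSwapped_eq]
      simp only [List.nil_append]
      rw [Bool.eq_iff_iff]
      simp only [List.contains_iff_mem, PySem.List.mem_dedup, decide_eq_true_iff]
      exact pvMem_swapped rights.toList c hc
    rw [hfil]
    by_cases h8 : 'k' ∈ rights.toList <;> by_cases h4 : 'q' ∈ rights.toList <;>
      by_cases h2 : 'K' ∈ rights.toList <;> by_cases h1 : 'Q' ∈ rights.toList <;>
      simp [h8, h4, h2, h1, pvSwapMap, pvResults, String.ofList] <;> rfl
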